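-- pv_equiv track=rewrite | github.com/eateverything/leetcode | funcking algorithm/动态规划系列/高楼扔鸡蛋.py | superEggDrop3
-- ===== SOURCE A (Python) =====
-- def superEggDrop3(K, N):
--     """
--     :type K: int
--     :type N: int
--     :rtype: int
--     """
--     dp = [[0] * (N+1) for _ in range(K+1)]
--     m = 0
--     while dp[K][m] < N:
--         m += 1
--         for k in range(1, K+1):
--             dp[k][m] = dp[k][m-1] + dp[k-1][m-1] + 1
--     return m
-- ===== SOURCE B (Python) =====
-- def superEggDrop3(K, N):
--     # binary-search the least number of trials m with f(m) = sum_{i=1..K} C(m,i) >= N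
--     def floors(m):
--         total, c = 0, 1
--         for i in range(1, min(K, m) + 1):
--             c = c * (m - i + 1) // i
--             total += c
--         return total
--     lo, hi = 0, N
--     while lo < hi:
--         mid = (lo + hi) // 2
--         if floors(mid) >= N:
--             hi = mid
--         else:
--             lo = mid + 1
--     return lo
-- ===== Notes on version B (the rewrite author's own statement) =====
-- stated objective: faster
-- what changed: Replaces the bottom-up (K+1)x(N+1) DP table with a binary search over the answer m, testing each candidate with the closed-form binomial partial sum f(m) = sum_{i=1..min(K,m)} C(m,i).
import Mathlib
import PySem

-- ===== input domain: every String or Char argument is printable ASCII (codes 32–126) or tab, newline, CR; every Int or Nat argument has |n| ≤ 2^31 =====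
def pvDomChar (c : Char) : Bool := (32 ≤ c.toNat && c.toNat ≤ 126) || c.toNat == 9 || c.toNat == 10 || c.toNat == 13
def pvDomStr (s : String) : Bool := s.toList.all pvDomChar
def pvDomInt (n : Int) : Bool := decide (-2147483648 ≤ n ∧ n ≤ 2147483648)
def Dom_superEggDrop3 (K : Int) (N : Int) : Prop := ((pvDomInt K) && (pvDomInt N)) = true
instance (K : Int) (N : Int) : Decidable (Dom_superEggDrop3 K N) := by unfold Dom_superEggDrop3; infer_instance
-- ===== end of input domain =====

-- B replaces A's bottom-up 2D DP table by a binary search over the answer m, testing each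
-- candidate with the closed-form binomial partial sum f(m) = sum_{i=1..min(K,m)} C(m,i); objective: faster.

-- ===== PORT A =====
-- inner loop body 'for k in range(1, K+1): dp[k][m] = dp[k][m-1] + dp[k-1][m-1] + 1' (one k step)
def pvColStep (m : Int) (dp : List (List Int)) (k : Int) : List (List Int) :=
  PySem.List.pySetD dp k
    (PySem.List.pySetD (PySem.List.pyGetD dp k []) m
      (PySem.List.pyGetD (PySem.List.pyGetD dp k []) (m - 1) 0 +
       PySem.List.pyGetD (PySem.List.pyGetD dp (k - 1) []) (m - 1) 0 + 1))

-- 'while dp[K][m] < N: m += 1; <fill column m>'; the fuel only makes the loop total (under Pre_ the loop runs at most N+1 times)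
def pvLoopA (K N : Int) : Nat → List (List Int) → Int → Int
  | 0, _, m => m
  | fuel + 1, dp, m =>
    if PySem.List.pyGetD (PySem.List.pyGetD dp K []) m 0 < N then
      pvLoopA K N fuel ((PySem.List.pyRange 1 (K + 1) 1).foldl (pvColStep (m + 1)) dp) (m + 1)
    else m

def superEggDrop3 (K : Int) (N : Int) : Int :=
  pvLoopA K N (N.toNat + 1)
    (List.replicate (K + 1).toNat (List.replicate (N + 1).toNat 0)) 0

-- ===== PORT B =====
-- 'for i in range(1, min(K, m) + 1): c = c * (m - i + 1) // i; total += c'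
def pvFloors (K m : Int) : Int :=
  ((PySem.List.pyRange 1 (min K m + 1) 1).foldl
    (fun (tc : Int × Int) i =>
      (tc.1 + PySem.Int.floordiv (tc.2 * (m - i + 1)) i,
       PySem.Int.floordiv (tc.2 * (m - i + 1)) i))
    (0, 1)).1

-- 'while lo < hi: ...' binary search; the fuel only makes the loop total (hi - lo shrinks every step)
def pvLoopB (K N : Int) : Nat → Int → Int → Int
  | 0, lo, _ => lo
  | fuel + 1, lo, hi =>
    if lo < hi then
      if pvFloors K (PySem.Int.floordiv (lo + hi) 2) ≥ N then
        pvLoopB K N fuel lo (PySem.Int.floordiv (lo + hi) 2)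
      else
        pvLoopB K N fuel (PySem.Int.floordiv (lo + hi) 2 + 1) hi
    else lo

def superEggDrop3_alt (K : Int) (N : Int) : Int := pvLoopB K N (N.toNat + 1) 0 N

-- ===== PRECONDITION & SPEC =====
-- Pre_ excludes K < 0 or N < 0 (A raises IndexError) and K = 0 with N > 0 (A never terminates).
def Pre_superEggDrop3 (K : Int) (N : Int) : Prop := 0 ≤ K ∧ 0 ≤ N ∧ (N = 0 ∨ 1 ≤ K)
instance (K : Int) (N : Int) : Decidable (Pre_superEggDrop3 K N) := by unfold Pre_superEggDrop3; infer_instance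
def pvWitness_superEggDrop3 : Int × Int := (2, 10)

def Spec_superEggDrop3 (K : Int) (N : Int) (out : Int) : Prop := out = superEggDrop3_alt K N
instance (K : Int) (N : Int) (out : Int) : Decidable (Spec_superEggDrop3 K N out) := by unfold Spec_superEggDrop3; infer_instance

-- ===== CLAIM (what is proved, stated in full; the proofs are below) =====
def Claim_equal_superEggDrop3 : Prop := ∀ (K : Int) (N : Int), Dom_superEggDrop3 K N → Pre_superEggDrop3 K N → Spec_superEggDrop3 K N (superEggDrop3 K N)

-- ===== LEMMAS AND PROOFS =====
-- dpVal k m is the mathematical content of A's table cell dp[k][m] (= sum_{i=1..k} C(m,i))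
def dpVal : Nat → Nat → Int
  | _, 0 => 0
  | 0, _ + 1 => 0
  | k + 1, m + 1 => dpVal (k + 1) m + dpVal k m + 1

theorem dpVal_zero_left (m : Nat) : dpVal 0 m = 0 := by cases m <;> rfl

theorem dpVal_nonneg (k m : Nat) : 0 ≤ dpVal k m := by
  induction m generalizing k with
  | zero => cases k <;> simp [dpVal]
  | succ m ih =>
    cases k with
    | zero => simp [dpVal]
    | succ k =>
      have h1 := ih (k + 1); have h2 := ih k
      simp only [dpVal]; omega

theorem dpVal_succ_le (k m : Nat) : dpVal k m ≤ dpVal k (m + 1) := by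
  cases k with
  | zero => simp [dpVal_zero_left]
  | succ k =>
    have := dpVal_nonneg k m
    simp only [dpVal]; omega

theorem dpVal_mono (k : Nat) {m m' : Nat} (h : m ≤ m') : dpVal k m ≤ dpVal k m' := by
  induction m' with
  | zero =>
    have : m = 0 := by omega
    subst this; exact le_refl _
  | succ m' ih =>
    rcases Nat.lt_or_ge m (m' + 1) with h' | h'
    · exact le_trans (ih (by omega)) (dpVal_succ_le k m')
    · have : m = m' + 1 := by omega
      subst this; rfl

theorem dpVal_ge (k m : Nat) (hk : 1 ≤ k) : (m : Int) ≤ dpVal k m := by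
  induction m with
  | zero => simp [dpVal]
  | succ m ih =>
    obtain ⟨k, rfl⟩ := Nat.exists_eq_add_of_le hk
    have h2 := dpVal_nonneg k m
    simp only [dpVal, Nat.add_comm 1 k] at *
    push_cast
    omega

theorem dpVal_eq_sum (k m : Nat) :
    dpVal k m = ∑ i ∈ Finset.range k, ((m.choose (i + 1) : Nat) : Int) := by
  induction m generalizing k with
  | zero =>
    cases k with
    | zero => simp [dpVal]
    | succ k => simp [dpVal]
  | succ m ih =>
    cases k with
    | zero => simp [dpVal_zero_left]
    | succ k =>
      have pascal : ∀ i ∈ Finset.range (k + 1), (((m + 1).choose (i + 1) : Nat) : Int)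
          = ((m.choose i : Nat) : Int) + ((m.choose (i + 1) : Nat) : Int) := by
        intro i _; exact_mod_cast Nat.choose_succ_succ m i
      rw [Finset.sum_congr rfl pascal, Finset.sum_add_distrib,
        Finset.sum_range_succ' (fun i => ((m.choose i : Nat) : Int)) k]
      simp only [dpVal, ih, Nat.choose_zero_right, Nat.cast_one]
      ring

theorem sum_choose_cap (m k : Nat) (h : m ≤ k) :
    ∑ i ∈ Finset.range k, ((m.choose (i + 1) : Nat) : Int)
      = ∑ i ∈ Finset.range m, ((m.choose (i + 1) : Nat) : Int) := by
  induction k, h using Nat.le_induction with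
  | base => rfl
  | succ k hk ih =>
    rw [Finset.sum_range_succ, ih, Nat.choose_eq_zero_of_lt (by omega)]
    simp

theorem floors_foldl (m j : Nat) (hj : j ≤ m) :
    (PySem.List.pyRange 1 ((j : Int) + 1) 1).foldl
      (fun (tc : Int × Int) i =>
        (tc.1 + PySem.Int.floordiv (tc.2 * ((m : Int) - i + 1)) i,
         PySem.Int.floordiv (tc.2 * ((m : Int) - i + 1)) i))
      (0, 1)
    = (∑ i ∈ Finset.range j, ((m.choose (i + 1) : Nat) : Int), ((m.choose j : Nat) : Int)) := by
  induction j with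
  | zero => simp [PySem.List.pyRange_one_eq_nil]
  | succ j ih =>
    have hj' : j ≤ m := by omega
    have hsplit : PySem.List.pyRange 1 ((j : Int) + 1 + 1) 1
        = PySem.List.pyRange 1 ((j : Int) + 1) 1 ++ [(j : Int) + 1] := by
      exact PySem.List.pyRange_one_succ_right (by omega)
    push_cast
    rw [hsplit, List.foldl_append, ih hj']
    simp only [List.foldl_cons, List.foldl_nil]
    have hmj : (m : Int) - ((j : Int) + 1) + 1 = ((m - j : Nat) : Int) := by
      rw [Nat.cast_sub hj']; ring
    have hprod : ((m.choose j : Nat) : Int) * ((m - j : Nat) : Int)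
        = ((m.choose (j + 1) * (j + 1) : Nat) : Int) := by
      exact_mod_cast (Nat.choose_succ_right_eq m j).symm
    have hden : ((j : Int) + 1) = (((j + 1 : Nat)) : Int) := by push_cast; ring
    rw [hmj, hprod, hden, PySem.Int.floordiv_natCast,
      Nat.mul_div_cancel _ (by omega : 0 < j + 1)]
    rw [Finset.sum_range_succ]

theorem pvFloors_eq (K m : Int) (hK : 0 ≤ K) (hm : 0 ≤ m) :
    pvFloors K m = dpVal K.toNat m.toNat := by
  obtain ⟨kn, rfl⟩ : ∃ kn : Nat, K = (kn : Int) := ⟨K.toNat, by omega⟩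
  obtain ⟨mn, rfl⟩ : ∃ mn : Nat, m = (mn : Int) := ⟨m.toNat, by omega⟩
  have hmin : min ((kn : Nat) : Int) ((mn : Nat) : Int) = ((min kn mn : Nat) : Int) := by
    push_cast; rfl
  rw [pvFloors, hmin, floors_foldl mn (min kn mn) (by omega)]
  simp only [Int.toNat_natCast]
  rw [dpVal_eq_sum]
  rcases Nat.le_total kn mn with h | h
  · rw [min_eq_left h]
  · rw [min_eq_right h, sum_choose_cap _ _ h]

theorem pvLoopB_spec (K N : Int) (hK : 0 ≤ K) (fuel : Nat) :
    ∀ lo hi : Int, 0 ≤ lo → lo ≤ hi → (hi - lo).toNat ≤ fuel →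
    (∀ x : Int, 0 ≤ x → x < lo → dpVal K.toNat x.toNat < N) →
    N ≤ dpVal K.toNat hi.toNat →
    0 ≤ pvLoopB K N fuel lo hi ∧ N ≤ dpVal K.toNat (pvLoopB K N fuel lo hi).toNat ∧
      ∀ x : Int, 0 ≤ x → x < pvLoopB K N fuel lo hi → dpVal K.toNat x.toNat < N := by
  induction fuel with
  | zero =>
    intro lo hi hlo hlohi hfuel hb ha
    have heq : lo = hi := by omega
    subst heq
    exact ⟨hlo, ha, hb⟩
  | succ fuel ih =>
    intro lo hi hlo hlohi hfuel hb ha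
    by_cases hlt : lo < hi
    · have hmb := PySem.Int.floordiv_two_mid_bounds hlohi
      have hmlt : PySem.Int.floordiv (lo + hi) 2 < hi := by
        rw [PySem.Int.floordiv_lt_iff_lt_mul (by norm_num)]; omega
      have hfl : pvFloors K (PySem.Int.floordiv (lo + hi) 2)
          = dpVal K.toNat (PySem.Int.floordiv (lo + hi) 2).toNat :=
        pvFloors_eq K _ hK (by omega)
      simp only [pvLoopB, if_pos hlt]
      by_cases hc : pvFloors K (PySem.Int.floordiv (lo + hi) 2) ≥ N
      · rw [if_pos hc]
        exact ih lo _ hlo hmb.1 (by omega) hb (by rw [hfl] at hc; exact hc)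
      · rw [if_neg hc]
        refine ih _ hi (by omega) (by omega) (by omega) ?_ ha
        intro x hx hxm
        have hmono : dpVal K.toNat x.toNat ≤ dpVal K.toNat (PySem.Int.floordiv (lo + hi) 2).toNat :=
          dpVal_mono _ (by omega)
        rw [hfl] at hc; omega
    · have heq : lo = hi := by omega
      subst heq
      simp only [pvLoopB, if_neg hlt]
      exact ⟨hlo, ha, hb⟩

theorem getD_set' {α : Type} (xs : List α) (n k : Nat) (v : α) (d : α) :
    (xs.set n v).getD k d = if k = n ∧ n < xs.length then v else xs.getD k d := by
  simp only [List.getD, List.getElem?_set]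
  by_cases h1 : n = k
  · subst h1
    by_cases h2 : n < xs.length <;> simp [h2]
  · have : ¬(k = n ∧ n < xs.length) := by tauto
    simp [h1, this]

def pvEnt (dp : List (List Int)) (k j : Nat) : Int := (dp.getD k []).getD j 0

def pvInv (Kn Nn : Nat) (dp : List (List Int)) (m : Nat) : Prop :=
  dp.length = Kn + 1 ∧ (∀ k : Nat, k ≤ Kn → (dp.getD k []).length = Nn + 1) ∧
  ∀ k j : Nat, k ≤ Kn → j ≤ Nn → pvEnt dp k j = if j ≤ m then dpVal k j else 0

theorem colStep_eq (dp : List (List Int)) (m t : Nat) :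
    pvColStep ((m : Int) + 1) dp ((t : Int) + 1)
      = dp.set (t + 1) ((dp.getD (t + 1) []).set (m + 1)
          ((dp.getD (t + 1) []).getD m 0 + (dp.getD t []).getD m 0 + 1)) := by
  have h1 : ((m : Int) + 1) - 1 = ((m : Nat) : Int) := by ring
  have h2 : ((t : Int) + 1) - 1 = ((t : Nat) : Int) := by ring
  have h3 : ((m : Int) + 1) = (((m + 1 : Nat)) : Int) := by push_cast; ring
  have h4 : ((t : Int) + 1) = (((t + 1 : Nat)) : Int) := by push_cast; ring
  rw [pvColStep, h1, h2, h3, h4, PySem.List.pyGetD_natCast, PySem.List.pyGetD_natCast,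
    PySem.List.pyGetD_natCast, PySem.List.pyGetD_natCast, PySem.List.pySetD_natCast,
    PySem.List.pySetD_natCast]

theorem colfill (Kn Nn : Nat) (dp : List (List Int)) (m : Nat)
    (hinv : pvInv Kn Nn dp m) (hm : m + 1 ≤ Nn) :
    ∀ t : Nat, t ≤ Kn →
      (((PySem.List.pyRange 1 ((t : Int) + 1) 1).foldl (pvColStep ((m : Int) + 1)) dp).length = Kn + 1 ∧
      (∀ k : Nat, k ≤ Kn → (((PySem.List.pyRange 1 ((t : Int) + 1) 1).foldl (pvColStep ((m : Int) + 1)) dp).getD k []).length = Nn + 1) ∧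
      ∀ k j : Nat, k ≤ Kn → j ≤ Nn →
        pvEnt ((PySem.List.pyRange 1 ((t : Int) + 1) 1).foldl (pvColStep ((m : Int) + 1)) dp) k j
          = if j ≤ m ∨ (j = m + 1 ∧ k ≤ t) then dpVal k j else 0) := by
  obtain ⟨hlen, hrows, hent⟩ := hinv
  intro t
  induction t with
  | zero =>
    intro _
    rw [show ((0 : Nat) : Int) + 1 = 1 by norm_num, PySem.List.pyRange_one_eq_nil (by omega)]
    simp only [List.foldl_nil]
    refine ⟨hlen, hrows, ?_⟩
    intro k j hk hj
    rw [hent k j hk hj]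
    by_cases h1 : j ≤ m
    · simp [h1]
    · by_cases h2 : j = m + 1 ∧ k ≤ 0
      · have hk0 : k = 0 := by omega
        subst hk0
        simp [h1, dpVal_zero_left]
      · rw [if_neg h1, if_neg (show ¬(j ≤ m ∨ (j = m + 1 ∧ k ≤ 0)) by tauto)]
  | succ t ih =>
    intro ht
    have ihP := ih (by omega)
    obtain ⟨plen, prows, pent⟩ := ihP
    have hsplit : PySem.List.pyRange 1 (((t + 1 : Nat) : Int) + 1) 1
        = PySem.List.pyRange 1 ((t : Int) + 1) 1 ++ [(t : Int) + 1] := by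
      rw [show (((t + 1 : Nat) : Int) + 1) = ((t : Int) + 1) + 1 by push_cast; ring]
      exact PySem.List.pyRange_one_succ_right (by omega)
    rw [hsplit, List.foldl_append, List.foldl_cons, List.foldl_nil]
    rw [colStep_eq]
    set dpP := (PySem.List.pyRange 1 ((t : Int) + 1) 1).foldl (pvColStep ((m : Int) + 1)) dp with hdpP
    have ht1 : t + 1 < dpP.length := by omega
    have hvm : (dpP.getD (t + 1) []).getD m 0 = dpVal (t + 1) m := by
      have := pent (t + 1) m ht (by omega)
      rw [pvEnt] at this; rw [this]; simp
    have hvm' : (dpP.getD t []).getD m 0 = dpVal t m := by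
      have := pent t m (by omega) (by omega)
      rw [pvEnt] at this; rw [this]; simp
    have hv : (dpP.getD (t + 1) []).getD m 0 + (dpP.getD t []).getD m 0 + 1
        = dpVal (t + 1) (m + 1) := by
      rw [hvm, hvm']; rfl
    refine ⟨by rw [List.length_set]; exact plen, ?_, ?_⟩
    · intro k hk
      rw [getD_set']
      by_cases h : k = t + 1 ∧ t + 1 < dpP.length
      · rw [if_pos h, List.length_set]; exact prows (t + 1) ht
      · rw [if_neg h]; exact prows k hk
    · intro k j hk hj
      rw [pvEnt, getD_set']
      by_cases h : k = t + 1 ∧ t + 1 < dpP.length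
      · rw [if_pos h]
        rw [getD_set']
        by_cases h2 : j = m + 1 ∧ m + 1 < (dpP.getD (t + 1) []).length
        · rw [if_pos h2, hv, h2.1, h.1]
          simp
        · have hj2 : ¬ j = m + 1 := by
            intro hje
            exact h2 ⟨hje, by rw [prows (t + 1) ht]; omega⟩
          rw [if_neg h2]
          have := pent k j hk hj
          rw [pvEnt, h.1] at this
          rw [h.1] at *
          rw [this]
          by_cases h1 : j ≤ m
          · simp [h1]
          · simp [h1, hj2]
      · have hk2 : ¬ k = t + 1 := by
          intro hke; exact h ⟨hke, ht1⟩
        rw [if_neg h]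
        have := pent k j hk hj
        rw [pvEnt] at this
        rw [this]
        by_cases h1 : j ≤ m
        · simp [h1]
        · by_cases h3 : j = m + 1 ∧ k ≤ t
          · simp [h3, (by omega : k ≤ t + 1)]
          · have : ¬ (j = m + 1 ∧ k ≤ t + 1) := by
              intro hc; exact h3 ⟨hc.1, by omega⟩
            simp [h1, h3, this]

theorem pvLoopA_spec (kn : Nat) (N : Int) (hN : 0 ≤ N) (hpos : N = 0 ∨ 1 ≤ kn) (fuel : Nat) :
    ∀ (dp : List (List Int)) (m : Nat), pvInv kn N.toNat dp m → m ≤ N.toNat →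
    N.toNat + 1 - m ≤ fuel →
    (∀ j : Nat, j < m → dpVal kn j < N) →
    ∃ r : Nat, pvLoopA (kn : Int) N fuel dp (m : Int) = (r : Int) ∧ N ≤ dpVal kn r ∧
      ∀ j : Nat, j < r → dpVal kn j < N := by
  induction fuel with
  | zero => intro dp m hinv hm hfuel hb; omega
  | succ fuel ih =>
    intro dp m hinv hm hfuel hb
    obtain ⟨hlen, hrows, hent⟩ := hinv
    have hcond : PySem.List.pyGetD (PySem.List.pyGetD dp ((kn : Nat) : Int) []) ((m : Nat) : Int) 0
        = dpVal kn m := by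
      rw [PySem.List.pyGetD_natCast, PySem.List.pyGetD_natCast]
      have := hent kn m (le_refl _) hm
      rw [pvEnt] at this; rw [this]; simp
    simp only [pvLoopA]
    by_cases hc : PySem.List.pyGetD (PySem.List.pyGetD dp ((kn : Nat) : Int) []) ((m : Nat) : Int) 0 < N
    · rw [if_pos hc]
      rw [hcond] at hc
      have hmN : m < N.toNat := by
        rcases hpos with h0 | h1
        · exfalso; have := dpVal_nonneg kn m; omega
        · have hg := dpVal_ge kn m h1; omega
      have hcol := colfill kn N.toNat dp m ⟨hlen, hrows, hent⟩ (by omega) kn (le_refl _)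
      obtain ⟨clen, crows, cent⟩ := hcol
      have hinv' : pvInv kn N.toNat
          ((PySem.List.pyRange 1 ((kn : Int) + 1) 1).foldl (pvColStep ((m : Int) + 1)) dp) (m + 1) := by
        refine ⟨clen, crows, ?_⟩
        intro k j hk hj
        rw [cent k j hk hj]
        by_cases h1 : j ≤ m
        · simp [h1, (by omega : j ≤ m + 1)]
        · by_cases h2 : j = m + 1
          · simp [h2, hk]
          · simp [h1, h2]; omega
      have hb' : ∀ j : Nat, j < m + 1 → dpVal kn j < N := by
        intro j hj
        rcases Nat.lt_or_ge j m with h | h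
        · exact hb j h
        · have : j = m := by omega
          subst this; exact hc
      have hrec := ih _ (m + 1) hinv' (by omega) (by omega) hb'
      rw [show ((m : Nat) : Int) + 1 = (((m + 1 : Nat)) : Int) by push_cast; ring]
      exact_mod_cast hrec
    · rw [if_neg hc]
      rw [hcond] at hc
      exact ⟨m, rfl, by omega, hb⟩

theorem dpVal_zero_right (k : Nat) : dpVal k 0 = 0 := by cases k <;> rfl

theorem loops_agree (K N : Int) (hK : 0 ≤ K) (hN : 0 ≤ N) (hpos : N = 0 ∨ 1 ≤ K) :
    pvLoopA K N (N.toNat + 1) (List.replicate (K + 1).toNat (List.replicate (N + 1).toNat 0)) 0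
      = pvLoopB K N (N.toNat + 1) 0 N := by
  obtain ⟨kn, rfl⟩ : ∃ kn : Nat, K = (kn : Int) := ⟨K.toNat, by omega⟩
  have hpos' : N = 0 ∨ 1 ≤ kn := by rcases hpos with h | h; exact Or.inl h; right; exact_mod_cast h
  have hKt : ((kn : Int) + 1).toNat = kn + 1 := by omega
  have hNt : (N + 1).toNat = N.toNat + 1 := by omega
  rw [hKt, hNt]
  have hinv0 : pvInv kn N.toNat (List.replicate (kn + 1) (List.replicate (N.toNat + 1) 0)) 0 := by
    refine ⟨List.length_replicate, ?_, ?_⟩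
    · intro k hk
      rw [List.getD_replicate _ (by omega), List.length_replicate]
    · intro k j hk hj
      rw [pvEnt, List.getD_replicate _ (by omega), List.getD_replicate _ (by omega)]
      by_cases h0 : j ≤ 0
      · have : j = 0 := by omega
        subst this; simp [dpVal_zero_right]
      · simp [h0]
  have habove : N ≤ dpVal kn N.toNat := by
    rcases hpos' with h | h
    · subst h; exact dpVal_nonneg kn 0
    · have := dpVal_ge kn N.toNat h; omega
  obtain ⟨r, hreq, hrge, hrbelow⟩ :=
    pvLoopA_spec kn N hN hpos' (N.toNat + 1)
      (List.replicate (kn + 1) (List.replicate (N.toNat + 1) 0)) 0 hinv0 (by omega) (by omega)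
      (by intro j hj; omega)
  obtain ⟨hBge, hBabove, hBbelow⟩ :=
    pvLoopB_spec (kn : Int) N (by positivity) (N.toNat + 1) 0 N (le_refl 0) hN (by omega)
      (by intro x hx hx0; omega) (by simpa using habove)
  rw [show ((0 : Nat) : Int) = (0 : Int) by norm_num] at hreq
  rw [hreq]
  set rB := pvLoopB (kn : Int) N (N.toNat + 1) 0 N with hrB
  simp only [Int.toNat_natCast] at hBabove hBbelow
  rcases lt_trichotomy ((r : Nat) : Int) rB with h | h | h
  · have := hBbelow (r : Int) (by positivity) h
    simp only [Int.toNat_natCast] at this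
    omega
  · exact h
  · have hlt : rB.toNat < r := by omega
    have := hrbelow rB.toNat hlt
    omega

-- ===== VERDICT (by name: the statement is the Claim_ definition above) =====
theorem superEggDrop3_spec : Claim_equal_superEggDrop3 := by
  intro K N _ hpre
  obtain ⟨hK, hN, hpos⟩ := hpre
  unfold Spec_superEggDrop3 superEggDrop3 superEggDrop3_alt
  exact loops_agree K N hK hN hpos
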